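-- pv_equiv track=rewrite | github.com/priyankaMehta1/Othello | FinalStrategy.py | flipTokens
-- ===== SOURCE A (Python) =====
-- def flipTokens(game,pos,table,player,opp):
--    count = 0
--    for i in table:
--       if pos in i:
--          positions = i[:]
--          characters = [game[x] for x in i]
--          if player in characters and opp in characters:
--             fragment = ''.join(characters)
--             setsX = ["XOX","XOOX","XOOOX","XOOOOX","XOOOOOX","XOOOOOOX"]
--             setsO = ["OXO","OXXO","OXXXO","OXXXXO","OXXXXXO","OXXXXXXO"]
--             if player == "X":
--                for x in setsX:
--                   if x in fragment:
--                      length = len(x)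
--                      index = positions.index(pos)
--                      frag1 = fragment[index:index + length]
--                      frag2 = fragment[index-length+1:index+1]
--                      if frag1 == x:
--                         for y in range(index, index+length):
--                            count+=1
--                      if frag2 == x:
--                         for y in range(index-length+1,index):
--                            count+=1
--             else:
--                for x in setsO:
--                   if x in fragment:
--                      length = len(x)
--                      index = positions.index(pos)
--                      frag1 = fragment[index:index + length]
--                      frag2 = fragment[index-length+1:index+1]
--                      if frag1 == x:
--                         for y in range(index, index+length):
--                            count+=1
--                      if frag2 == x:
--                         for y in range(index-length+1,index):
--                            count+=1
--    return count
-- ===== SOURCE B (Python) =====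
-- def _run(s, c):
--     # length of the leading run of character c in s
--     r = 0
--     for ch in s:
--         if ch != c:
--             break
--         r += 1
--     return r
--
-- def flipTokens(game, pos, table, player, opp):
--     c1 = "X" if player == "X" else "O"
--     c2 = "O" if player == "X" else "X"
--     count = 0
--     for row in table:
--         if pos not in row:
--             continue
--         chars = [game[x] for x in row]
--         if not (player in chars and opp in chars):
--             continue
--         frag = ''.join(chars)
--         idx = row.index(pos)
--         if idx >= len(frag) or frag[idx] != c1:
--             continue
--         # forward: run of opponents right of idx, closed by c1
--         rest = frag[idx + 1:]
--         r = _run(rest, c2)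
--         if 1 <= r <= 6 and r < len(rest) and rest[r] == c1:
--             count += r + 2
--         # backward: run of opponents left of idx, closed by c1
--         back = frag[:idx][::-1]
--         r = _run(back, c2)
--         if 1 <= r <= 6 and r < len(back) and back[r] == c1:
--             count += r + 1
--     return count
-- ===== Notes on version B (the rewrite author's own statement) =====
-- stated objective: simpler
-- what changed: Replaces A's fixed list of 12 flip patterns ('XOX'..'XOOOOOOX') with substring tests and slice comparisons by two direct neighbor scans per line: count the run of opponent tokens right (resp. left) of pos and check the single closing token, merging the X and O branches into one parameterised pass.
import Mathlib
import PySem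

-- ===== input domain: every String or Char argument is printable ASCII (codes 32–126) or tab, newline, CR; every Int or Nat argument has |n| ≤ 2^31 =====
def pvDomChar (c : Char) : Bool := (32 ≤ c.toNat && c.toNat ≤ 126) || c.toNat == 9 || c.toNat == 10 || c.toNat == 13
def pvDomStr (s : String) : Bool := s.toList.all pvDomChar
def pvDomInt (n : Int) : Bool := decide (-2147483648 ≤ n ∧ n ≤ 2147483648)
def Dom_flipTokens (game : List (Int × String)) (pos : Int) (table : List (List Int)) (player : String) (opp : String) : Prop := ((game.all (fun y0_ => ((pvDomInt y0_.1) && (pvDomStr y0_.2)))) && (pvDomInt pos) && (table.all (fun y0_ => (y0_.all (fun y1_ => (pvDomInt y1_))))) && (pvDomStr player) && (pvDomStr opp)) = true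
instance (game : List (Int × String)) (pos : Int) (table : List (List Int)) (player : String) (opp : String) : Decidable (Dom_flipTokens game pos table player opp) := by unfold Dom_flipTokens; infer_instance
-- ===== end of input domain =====

-- B replaces A's fixed 12-pattern substring/slice matching by two direct neighbor run-scans per
-- line (objective: simpler; equivalence proved on Pre_, which excludes only inputs where the
-- Python raises KeyError — both A and B raise there).

-- ===== PORT A =====
-- A's inner `for x in sets:` loop body, used verbatim by the fold below.
def aBody (fragment : List Char) (positions : List Int) (pos : Int) (count : Int) (x : List Char) : Int :=
  if PySem.Chars.isIn x fragment then
    let length : Int := (x.length : Int)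
    let index : Int := (((PySem.List.index? positions pos).getD 0 : Nat) : Int)
    let frag1 := PySem.List.slice fragment (some index) (some (index + length))
    let frag2 := PySem.List.slice fragment (some (index - length + 1)) (some (index + 1))
    let count := if frag1 = x then (PySem.List.pyRange index (index + length) 1).foldl (fun c _ => c + 1) count else count
    if frag2 = x then (PySem.List.pyRange (index - length + 1) index 1).foldl (fun c _ => c + 1) count else count
  else count

def flipTokens (game : List (Int × String)) (pos : Int) (table : List (List Int)) (player : String) (opp : String) : Int :=
  table.foldl (fun count i =>
    if pos ∈ i then
      let positions : List Int := i
      -- game[x]: KeyError (key absent) is excluded by Pre_; the port returns "" there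
      let characters : List String := i.map (fun x => (PySem.Dict.get? (PySem.Dict.mk game) x).getD "")
      if player ∈ characters ∧ opp ∈ characters then
        let fragment : List Char := (PySem.Str.join "" characters).toList
        let setsX : List (List Char) := ["XOX".toList, "XOOX".toList, "XOOOX".toList, "XOOOOX".toList, "XOOOOOX".toList, "XOOOOOOX".toList]
        let setsO : List (List Char) := ["OXO".toList, "OXXO".toList, "OXXXO".toList, "OXXXXO".toList, "OXXXXXO".toList, "OXXXXXXO".toList]
        if player = "X" then setsX.foldl (aBody fragment positions pos) count
        else setsO.foldl (aBody fragment positions pos) count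
      else count
    else count) 0

-- ===== PORT B =====
-- `_run` of Source B: length of the leading run of c (the for-loop with break, structurally).
def runLen (c : Char) : List Char → Nat
  | [] => 0
  | ch :: t => if ch = c then runLen c t + 1 else 0

-- the per-line part of Source B after `idx = row.index(pos)`: guard, forward scan, backward scan
def bScan (c1 c2 : Char) (frag : List Char) (idx : Nat) (count : Int) : Int :=
  if idx < frag.length ∧ frag[idx]? = some c1 then
    let rest := frag.drop (idx + 1)
    let r := runLen c2 rest
    let count := if 1 ≤ r ∧ r ≤ 6 ∧ (r < rest.length ∧ rest[r]? = some c1) then count + (r : Int) + 2 else count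
    let back := (frag.take idx).reverse
    let r2 := runLen c2 back
    if 1 ≤ r2 ∧ r2 ≤ 6 ∧ (r2 < back.length ∧ back[r2]? = some c1) then count + (r2 : Int) + 1 else count
  else count

def flipTokens_alt (game : List (Int × String)) (pos : Int) (table : List (List Int)) (player : String) (opp : String) : Int :=
  let c1 : Char := if player = "X" then 'X' else 'O'
  let c2 : Char := if player = "X" then 'O' else 'X'
  table.foldl (fun count row =>
    if pos ∈ row then
      -- game[x]: KeyError (key absent) is excluded by Pre_; the port returns "" there
      let chars : List String := row.map (fun x => (PySem.Dict.get? (PySem.Dict.mk game) x).getD "")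
      if player ∈ chars ∧ opp ∈ chars then
        let frag : List Char := (PySem.Str.join "" chars).toList
        bScan c1 c2 frag ((PySem.List.index? row pos).getD 0) count
      else count
    else count) 0

-- ===== PRECONDITION & SPEC =====
-- Pre_ excludes exactly the inputs where `game[x]` raises KeyError (a row containing pos holds
-- an index that is not a key of game); both A and B raise there.
def Pre_flipTokens (game : List (Int × String)) (pos : Int) (table : List (List Int)) (player : String) (opp : String) : Prop :=
  ∀ i ∈ table, pos ∈ i → ∀ x ∈ i, (PySem.Dict.get? (PySem.Dict.mk game) x).isSome = true
instance (game : List (Int × String)) (pos : Int) (table : List (List Int)) (player : String) (opp : String) : Decidable (Pre_flipTokens game pos table player opp) := by unfold Pre_flipTokens; infer_instance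

def pvWitness_flipTokens : (List (Int × String)) × Int × List (List Int) × String × String :=
  ([(0, "X"), (1, "O"), (2, "X")], 0, [[0, 1, 2]], "X", "O")

def Spec_flipTokens (game : List (Int × String)) (pos : Int) (table : List (List Int)) (player : String) (opp : String) (out : Int) : Prop := out = flipTokens_alt game pos table player opp
instance (game : List (Int × String)) (pos : Int) (table : List (List Int)) (player : String) (opp : String) (out : Int) : Decidable (Spec_flipTokens game pos table player opp out) := by unfold Spec_flipTokens; infer_instance

-- ===== CLAIM (what is proved, stated in full; the proofs are below) =====
def Claim_equal_flipTokens : Prop := ∀ (game : List (Int × String)) (pos : Int) (table : List (List Int)) (player : String) (opp : String), Dom_flipTokens game pos table player opp → Pre_flipTokens game pos table player opp → Spec_flipTokens game pos table player opp (flipTokens game pos table player opp)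

-- ===== LEMMAS AND PROOFS =====

-- the flip pattern of run length m: c1, m copies of c2, c1  ("XOX", "XOOX", … for m = 1..6)
def patL (c1 c2 : Char) (m : Nat) : List Char := c1 :: (List.replicate m c2 ++ [c1])

theorem length_patL (c1 c2 : Char) (m : Nat) : (patL c1 c2 m).length = m + 2 := by
  simp [patL]

theorem append_singleton_prefix_iff (l : List Char) (a : Char) (s : List Char) :
    l ++ [a] <+: s ↔ l <+: s ∧ s[l.length]? = some a := by
  induction l generalizing s with
  | nil =>
    cases s with
    | nil => simp
    | cons b t => simp [List.cons_prefix_cons, eq_comm]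
  | cons b l ih =>
    cases s with
    | nil => simp
    | cons c t =>
      simp only [List.cons_append, List.cons_prefix_cons, ih, List.length_cons,
        List.getElem?_cons_succ]
      tauto

theorem run_prefix_iff (c1 c2 : Char) (hne : c1 ≠ c2) (m : Nat) (t : List Char) :
    List.replicate m c2 ++ [c1] <+: t ↔ runLen c2 t = m ∧ t[m]? = some c1 := by
  induction m generalizing t with
  | zero =>
    cases t with
    | nil => simp
    | cons b u =>
      simp only [List.replicate_zero, List.nil_append, List.prefix_iff_eq_take,
        List.getElem?_cons_zero, runLen]
      constructor
      · rintro h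
        obtain rfl : c1 = b := by simpa using h
        simp [hne]
      · rintro ⟨h0, hb⟩
        obtain rfl : b = c1 := by simpa [eq_comm] using hb
        simp
  | succ m ih =>
    cases t with
    | nil => simp
    | cons b u =>
      simp only [List.replicate_succ, List.cons_append, List.cons_prefix_cons, runLen,
        List.getElem?_cons_succ]
      constructor
      · rintro ⟨rfl, h⟩
        rcases (ih u).mp h with ⟨hr, hu⟩
        simp [hr, hu]
      · rintro ⟨hrun, hu⟩
        by_cases hb : b = c2
        · have hrm : runLen c2 u = m := by simpa [hb] using hrun
          exact ⟨hb.symm, (ih u).mpr ⟨hrm, hu⟩⟩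
        · simp [hb] at hrun

theorem fwd_iff (c1 c2 : Char) (hne : c1 ≠ c2) (L : List Char) (k m : Nat) :
    PySem.List.slice L (some (k : Int)) (some ((k : Int) + ((m : Int) + 2))) = patL c1 c2 m ↔
      (k < L.length ∧ L[k]? = some c1) ∧
        runLen c2 (L.drop (k + 1)) = m ∧
          (m < (L.drop (k + 1)).length ∧ (L.drop (k + 1))[m]? = some c1) := by
  rw [PySem.List.slice_toNat L (a := (k : Int)) (b := (k : Int) + ((m : Int) + 2))
    (by positivity) (by positivity)]
  rw [show ((k : Int)).toNat = k from by omega,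
    show ((k : Int) + ((m : Int) + 2)).toNat = k + (m + 2) from by omega]
  rw [show k + (m + 2) - k = m + 2 from by omega]
  constructor
  · intro h
    have hpre : patL c1 c2 m <+: L.drop k :=
      List.prefix_iff_eq_take.mpr (by rw [length_patL]; exact h.symm)
    have hk : k < L.length := by
      by_contra hk
      rw [List.drop_eq_nil_of_le (by omega)] at hpre
      simp [patL] at hpre
    rw [List.drop_eq_getElem_cons hk, patL] at hpre
    obtain ⟨hc, hrest⟩ := List.cons_prefix_cons.mp hpre
    obtain ⟨hrun, hm⟩ := (run_prefix_iff c1 c2 hne m _).mp hrest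
    have hmlt : m < (L.drop (k + 1)).length := by
      rcases List.getElem?_eq_some_iff.mp hm with ⟨hlt, _⟩; exact hlt
    exact ⟨⟨hk, by rw [List.getElem?_eq_getElem hk, ← hc]⟩, hrun, hmlt, hm⟩
  · rintro ⟨⟨hk, hck⟩, hrun, hmlt, hm⟩
    have hrest : List.replicate m c2 ++ [c1] <+: L.drop (k + 1) :=
      (run_prefix_iff c1 c2 hne m _).mpr ⟨hrun, hm⟩
    have hc1 : c1 = L[k] := by
      rw [List.getElem?_eq_getElem hk] at hck
      exact (Option.some.inj hck).symm
    have hpre : patL c1 c2 m <+: L.drop k := by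
      rw [List.drop_eq_getElem_cons hk, patL]
      exact List.cons_prefix_cons.mpr ⟨hc1, hrest⟩
    have h := List.prefix_iff_eq_take.mp hpre
    rw [length_patL] at h
    exact h.symm

theorem bwd_iff (c1 c2 : Char) (hne : c1 ≠ c2) (L : List Char) (k m : Nat) :
    PySem.List.slice L (some ((k : Int) - ((m : Int) + 2) + 1)) (some ((k : Int) + 1)) = patL c1 c2 m ↔
      (k < L.length ∧ L[k]? = some c1) ∧
        runLen c2 ((L.take k).reverse) = m ∧
          (m < ((L.take k).reverse).length ∧ ((L.take k).reverse)[m]? = some c1) := by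
  by_cases hm : m + 1 ≤ k
  · rw [show (k : Int) - ((m : Int) + 2) + 1 = ((k - (m + 1) : Nat) : Int) from by omega]
    rw [PySem.List.slice_toNat L (a := ((k - (m + 1) : Nat) : Int)) (b := (k : Int) + 1)
      (by positivity) (by positivity)]
    rw [show (((k - (m + 1) : Nat) : Int)).toNat = k - (m + 1) from by omega,
      show ((k : Int) + 1).toNat = k + 1 from by omega,
      show k + 1 - (k - (m + 1)) = m + 2 from by omega]
    constructor
    · intro h
      have hpre : patL c1 c2 m <+: L.drop (k - (m + 1)) :=
        List.prefix_iff_eq_take.mpr (by rw [length_patL]; exact h.symm)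
      rw [show patL c1 c2 m = (c1 :: List.replicate m c2) ++ [c1] from by simp [patL],
        append_singleton_prefix_iff] at hpre
      obtain ⟨hq, hlast⟩ := hpre
      rw [show (c1 :: List.replicate m c2).length = m + 1 from by simp, List.getElem?_drop,
        show k - (m + 1) + (m + 1) = k from by omega] at hlast
      have hk : k < L.length := by
        rcases List.getElem?_eq_some_iff.mp hlast with ⟨hlt, _⟩; exact hlt
      have hq' : (c1 :: List.replicate m c2) = List.take (m + 1) (L.drop (k - (m + 1))) := by
        have h2 := List.prefix_iff_eq_take.mp hq
        rwa [show (c1 :: List.replicate m c2).length = m + 1 from by simp] at h2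
      have htk : (c1 :: List.replicate m c2) <:+ L.take k := by
        rw [List.suffix_iff_eq_drop, List.length_take,
          show (c1 :: List.replicate m c2).length = m + 1 from by simp,
          show min k L.length - (m + 1) = k - (m + 1) from by omega, List.drop_take,
          show k - (k - (m + 1)) = m + 1 from by omega]
        exact hq'
      have hrev : List.replicate m c2 ++ [c1] <+: (L.take k).reverse := by
        have h2 : (c1 :: List.replicate m c2).reverse <+: (L.take k).reverse :=
          List.reverse_prefix.mpr htk
        simpa using h2
      obtain ⟨hrun, hmm⟩ := (run_prefix_iff c1 c2 hne m _).mp hrev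
      have hmlt : m < ((L.take k).reverse).length := by
        rcases List.getElem?_eq_some_iff.mp hmm with ⟨hlt, _⟩; exact hlt
      exact ⟨⟨hk, hlast⟩, hrun, hmlt, hmm⟩
    · rintro ⟨⟨hk, hck⟩, hrun, hmlt, hmm⟩
      have hrev : List.replicate m c2 ++ [c1] <+: (L.take k).reverse :=
        (run_prefix_iff c1 c2 hne m _).mpr ⟨hrun, hmm⟩
      have htk : (c1 :: List.replicate m c2) <:+ L.take k := by
        rw [← List.reverse_prefix]
        simpa using hrev
      have hq : (c1 :: List.replicate m c2) <+: L.drop (k - (m + 1)) := by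
        have h2 := List.suffix_iff_eq_drop.mp htk
        rw [List.length_take, show (c1 :: List.replicate m c2).length = m + 1 from by simp,
          show min k L.length - (m + 1) = k - (m + 1) from by omega, List.drop_take,
          show k - (k - (m + 1)) = m + 1 from by omega] at h2
        exact List.prefix_iff_eq_take.mpr
          (by rw [show (c1 :: List.replicate m c2).length = m + 1 from by simp]; exact h2)
      have hpre : patL c1 c2 m <+: L.drop (k - (m + 1)) := by
        rw [show patL c1 c2 m = (c1 :: List.replicate m c2) ++ [c1] from by simp [patL],
          append_singleton_prefix_iff]
        refine ⟨hq, ?_⟩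
        rw [show (c1 :: List.replicate m c2).length = m + 1 from by simp, List.getElem?_drop,
          show k - (m + 1) + (m + 1) = k from by omega]
        exact hck
      have h := List.prefix_iff_eq_take.mp hpre
      rw [length_patL] at h
      exact h.symm
  · constructor
    · intro h
      exfalso
      have hl := congrArg List.length h
      rw [PySem.List.length_slice, length_patL] at hl
      simp only [PySem.List.clampIdx] at hl
      split_ifs at hl <;> omega
    · rintro ⟨⟨hk, hck⟩, hrun, hmlt, hmm⟩
      exfalso
      have hlen : ((L.take k).reverse).length ≤ k := by simp
      omega

theorem count_fold (a b count : Int) :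
    (PySem.List.pyRange a b 1).foldl (fun c _ => c + 1) count = count + ((b - a).toNat : Int) := by
  have h := PySem.List.foldl_add (PySem.List.pyRange a b 1) (fun _ => (1 : Int)) count
  simpa [PySem.List.sum_map_const_int, PySem.List.length_pyRange_one] using h

theorem slice_isInfix (xs : List Char) (a b : Option Int) : PySem.List.slice xs a b <:+: xs := by
  show List.take _ (List.drop _ xs) <:+: xs
  exact ((List.take_prefix _ _).isInfix).trans (List.drop_suffix _ _).isInfix

theorem aBody_pat (c1 c2 : Char) (hne : c1 ≠ c2) (L : List Char) (positions : List Int) (pos : Int)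
    (count : Int) (m : Nat) :
    aBody L positions pos count (patL c1 c2 m) =
      count +
        (if (((PySem.List.index? positions pos).getD 0 : Nat) < L.length ∧ L[((PySem.List.index? positions pos).getD 0 : Nat)]? = some c1) ∧
            runLen c2 (L.drop (((PySem.List.index? positions pos).getD 0 : Nat) + 1)) = m ∧
              (m < (L.drop (((PySem.List.index? positions pos).getD 0 : Nat) + 1)).length ∧ (L.drop (((PySem.List.index? positions pos).getD 0 : Nat) + 1))[m]? = some c1)
          then (m : Int) + 2 else 0) +
        (if (((PySem.List.index? positions pos).getD 0 : Nat) < L.length ∧ L[((PySem.List.index? positions pos).getD 0 : Nat)]? = some c1) ∧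
            runLen c2 ((L.take ((PySem.List.index? positions pos).getD 0 : Nat)).reverse) = m ∧
              (m < ((L.take ((PySem.List.index? positions pos).getD 0 : Nat)).reverse).length ∧ ((L.take ((PySem.List.index? positions pos).getD 0 : Nat)).reverse)[m]? = some c1)
          then (m : Int) + 1 else 0) := by
  set k : Nat := (PySem.List.index? positions pos).getD 0 with hkdef
  by_cases hin : PySem.Chars.isIn (patL c1 c2 m) L = true
  · simp only [aBody, hin, if_true, length_patL]
    simp only [← hkdef]
    rw [show ((m + 2 : Nat) : Int) = (m : Int) + 2 from by push_cast; ring]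
    simp only [fwd_iff c1 c2 hne L k m, bwd_iff c1 c2 hne L k m]
    rw [count_fold, count_fold]
    rw [show (((k : Int) + ((m : Int) + 2)) - (k : Int)).toNat = m + 2 from by omega,
      show ((k : Int) - (((k : Int) - ((m : Int) + 2) + 1))).toNat = m + 1 from by omega]
    split_ifs <;> push_cast <;> ring
  · have hF : ¬((k < L.length ∧ L[k]? = some c1) ∧
        runLen c2 (L.drop (k + 1)) = m ∧
          (m < (L.drop (k + 1)).length ∧ (L.drop (k + 1))[m]? = some c1)) := by
      intro hc
      apply hin
      have hs := (fwd_iff c1 c2 hne L k m).mpr hc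
      rw [PySem.Chars.isIn_iff_infix, ← hs]
      exact slice_isInfix L _ _
    have hB : ¬((k < L.length ∧ L[k]? = some c1) ∧
        runLen c2 ((L.take k).reverse) = m ∧
          (m < ((L.take k).reverse).length ∧ ((L.take k).reverse)[m]? = some c1)) := by
      intro hc
      apply hin
      have hs := (bwd_iff c1 c2 hne L k m).mpr hc
      rw [PySem.Chars.isIn_iff_infix, ← hs]
      exact slice_isInfix L _ _
    rw [if_neg hF, if_neg hB]
    simp [aBody, hin]

theorem sixSum (P : Prop) [Decidable P] (Q : Nat → Prop) [inst : DecidablePred Q] (r : Nat) (a : Int) :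
    (if P ∧ r = 1 ∧ Q 1 then (1 : Int) + a else 0) + (if P ∧ r = 2 ∧ Q 2 then (2 : Int) + a else 0)
      + (if P ∧ r = 3 ∧ Q 3 then (3 : Int) + a else 0) + (if P ∧ r = 4 ∧ Q 4 then (4 : Int) + a else 0)
      + (if P ∧ r = 5 ∧ Q 5 then (5 : Int) + a else 0) + (if P ∧ r = 6 ∧ Q 6 then (6 : Int) + a else 0)
      = if P ∧ 1 ≤ r ∧ r ≤ 6 ∧ Q r then (r : Int) + a else 0 := by
  by_cases hP : P
  · by_cases h16 : 1 ≤ r ∧ r ≤ 6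
    · obtain ⟨h1, h6⟩ := h16
      interval_cases r <;> simp [hP]
    · have n1 : ¬(P ∧ r = 1 ∧ Q 1) := by rintro ⟨-, rfl, -⟩; exact h16 ⟨by omega, by omega⟩
      have n2 : ¬(P ∧ r = 2 ∧ Q 2) := by rintro ⟨-, rfl, -⟩; exact h16 ⟨by omega, by omega⟩
      have n3 : ¬(P ∧ r = 3 ∧ Q 3) := by rintro ⟨-, rfl, -⟩; exact h16 ⟨by omega, by omega⟩
      have n4 : ¬(P ∧ r = 4 ∧ Q 4) := by rintro ⟨-, rfl, -⟩; exact h16 ⟨by omega, by omega⟩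
      have n5 : ¬(P ∧ r = 5 ∧ Q 5) := by rintro ⟨-, rfl, -⟩; exact h16 ⟨by omega, by omega⟩
      have n6 : ¬(P ∧ r = 6 ∧ Q 6) := by rintro ⟨-, rfl, -⟩; exact h16 ⟨by omega, by omega⟩
      have nR : ¬(P ∧ 1 ≤ r ∧ r ≤ 6 ∧ Q r) := by rintro ⟨-, h1', h6', -⟩; exact h16 ⟨h1', h6'⟩
      rw [if_neg n1, if_neg n2, if_neg n3, if_neg n4, if_neg n5, if_neg n6, if_neg nR]
      ring
  · simp [hP]

set_option maxHeartbeats 1000000 in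
theorem row_eq (c1 c2 : Char) (hne : c1 ≠ c2) (L : List Char) (positions : List Int) (pos : Int)
    (count : Int) :
    [patL c1 c2 1, patL c1 c2 2, patL c1 c2 3, patL c1 c2 4, patL c1 c2 5, patL c1 c2 6].foldl
        (aBody L positions pos) count =
      bScan c1 c2 L ((PySem.List.index? positions pos).getD 0) count := by
  simp only [List.foldl_cons, List.foldl_nil, aBody_pat c1 c2 hne L positions pos]
  simp only [bScan]
  generalize ((PySem.List.index? positions pos).getD 0 : Nat) = k
  generalize L.drop (k + 1) = rest
  generalize (L.take k).reverse = back
  have hF := sixSum (k < L.length ∧ L[k]? = some c1)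
    (fun m => m < rest.length ∧ rest[m]? = some c1) (runLen c2 rest) 2
  have hB := sixSum (k < L.length ∧ L[k]? = some c1)
    (fun m => m < back.length ∧ back[m]? = some c1) (runLen c2 back) 1
  simp only at hF hB
  by_cases hP : k < L.length ∧ L[k]? = some c1
  · rw [if_pos hP]
    by_cases hx1 : 1 ≤ runLen c2 rest ∧ runLen c2 rest ≤ 6 ∧
        (runLen c2 rest < rest.length ∧ rest[runLen c2 rest]? = some c1)
    · rw [if_pos hx1]
      rw [if_pos (show (k < L.length ∧ L[k]? = some c1) ∧ 1 ≤ runLen c2 rest ∧ runLen c2 rest ≤ 6 ∧ (runLen c2 rest < rest.length ∧ rest[runLen c2 rest]? = some c1) from ⟨hP, hx1⟩)] at hF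
      by_cases hx2 : 1 ≤ runLen c2 back ∧ runLen c2 back ≤ 6 ∧
          (runLen c2 back < back.length ∧ back[runLen c2 back]? = some c1)
      · rw [if_pos hx2]
        rw [if_pos (show (k < L.length ∧ L[k]? = some c1) ∧ 1 ≤ runLen c2 back ∧ runLen c2 back ≤ 6 ∧ (runLen c2 back < back.length ∧ back[runLen c2 back]? = some c1) from ⟨hP, hx2⟩)] at hB
        push_cast at hF hB ⊢
        linarith [hF, hB]
      · rw [if_neg hx2]
        rw [if_neg (show ¬((k < L.length ∧ L[k]? = some c1) ∧ 1 ≤ runLen c2 back ∧ runLen c2 back ≤ 6 ∧ (runLen c2 back < back.length ∧ back[runLen c2 back]? = some c1)) from fun hc => hx2 hc.2)] at hB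
        push_cast at hF hB ⊢
        linarith [hF, hB]
    · rw [if_neg hx1]
      rw [if_neg (show ¬((k < L.length ∧ L[k]? = some c1) ∧ 1 ≤ runLen c2 rest ∧ runLen c2 rest ≤ 6 ∧ (runLen c2 rest < rest.length ∧ rest[runLen c2 rest]? = some c1)) from fun hc => hx1 hc.2)] at hF
      by_cases hx2 : 1 ≤ runLen c2 back ∧ runLen c2 back ≤ 6 ∧
          (runLen c2 back < back.length ∧ back[runLen c2 back]? = some c1)
      · rw [if_pos hx2]
        rw [if_pos (show (k < L.length ∧ L[k]? = some c1) ∧ 1 ≤ runLen c2 back ∧ runLen c2 back ≤ 6 ∧ (runLen c2 back < back.length ∧ back[runLen c2 back]? = some c1) from ⟨hP, hx2⟩)] at hB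
        push_cast at hF hB ⊢
        linarith [hF, hB]
      · rw [if_neg hx2]
        rw [if_neg (show ¬((k < L.length ∧ L[k]? = some c1) ∧ 1 ≤ runLen c2 back ∧ runLen c2 back ≤ 6 ∧ (runLen c2 back < back.length ∧ back[runLen c2 back]? = some c1)) from fun hc => hx2 hc.2)] at hB
        push_cast at hF hB ⊢
        linarith [hF, hB]
  · rw [if_neg hP]
    rw [if_neg (show ¬((k < L.length ∧ L[k]? = some c1) ∧ 1 ≤ runLen c2 rest ∧ runLen c2 rest ≤ 6 ∧ (runLen c2 rest < rest.length ∧ rest[runLen c2 rest]? = some c1)) from fun hc => hP hc.1)] at hF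
    rw [if_neg (show ¬((k < L.length ∧ L[k]? = some c1) ∧ 1 ≤ runLen c2 back ∧ runLen c2 back ≤ 6 ∧ (runLen c2 back < back.length ∧ back[runLen c2 back]? = some c1)) from fun hc => hP hc.1)] at hB
    push_cast at hF hB ⊢
    linarith [hF, hB]

theorem row_eq_X (L : List Char) (positions : List Int) (pos : Int) (count : Int) :
    ["XOX".toList, "XOOX".toList, "XOOOX".toList, "XOOOOX".toList, "XOOOOOX".toList,
        "XOOOOOOX".toList].foldl (aBody L positions pos) count =
      bScan 'X' 'O' L ((PySem.List.index? positions pos).getD 0) count := by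
  rw [show ["XOX".toList, "XOOX".toList, "XOOOX".toList, "XOOOOX".toList, "XOOOOOX".toList,
      "XOOOOOOX".toList] = [patL 'X' 'O' 1, patL 'X' 'O' 2, patL 'X' 'O' 3, patL 'X' 'O' 4,
      patL 'X' 'O' 5, patL 'X' 'O' 6] from by decide]
  exact row_eq 'X' 'O' (by decide) L positions pos count

theorem row_eq_O (L : List Char) (positions : List Int) (pos : Int) (count : Int) :
    ["OXO".toList, "OXXO".toList, "OXXXO".toList, "OXXXXO".toList, "OXXXXXO".toList,
        "OXXXXXXO".toList].foldl (aBody L positions pos) count =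
      bScan 'O' 'X' L ((PySem.List.index? positions pos).getD 0) count := by
  rw [show ["OXO".toList, "OXXO".toList, "OXXXO".toList, "OXXXXO".toList, "OXXXXXO".toList,
      "OXXXXXXO".toList] = [patL 'O' 'X' 1, patL 'O' 'X' 2, patL 'O' 'X' 3, patL 'O' 'X' 4,
      patL 'O' 'X' 5, patL 'O' 'X' 6] from by decide]
  exact row_eq 'O' 'X' (by decide) L positions pos count

-- ===== VERDICT (by name: the statement is the Claim_ definition above) =====
theorem flipTokens_spec : Claim_equal_flipTokens := by
  intro game pos table player opp hdom hpre
  unfold Spec_flipTokens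
  by_cases hX : player = "X"
  · simp only [flipTokens, flipTokens_alt, if_pos hX]
    apply PySem.List.foldl_congr_mem
    intro count i hi
    by_cases hpos : pos ∈ i
    · rw [if_pos hpos, if_pos hpos]
      by_cases hmem : player ∈ i.map (fun x => (PySem.Dict.get? (PySem.Dict.mk game) x).getD "") ∧
          opp ∈ i.map (fun x => (PySem.Dict.get? (PySem.Dict.mk game) x).getD "")
      · rw [if_pos hmem, if_pos hmem]
        exact row_eq_X _ i pos count
      · rw [if_neg hmem, if_neg hmem]
    · rw [if_neg hpos, if_neg hpos]
  · simp only [flipTokens, flipTokens_alt, if_neg hX]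
    apply PySem.List.foldl_congr_mem
    intro count i hi
    by_cases hpos : pos ∈ i
    · rw [if_pos hpos, if_pos hpos]
      by_cases hmem : player ∈ i.map (fun x => (PySem.Dict.get? (PySem.Dict.mk game) x).getD "") ∧
          opp ∈ i.map (fun x => (PySem.Dict.get? (PySem.Dict.mk game) x).getD "")
      · rw [if_pos hmem, if_pos hmem]
        exact row_eq_O _ i pos count
      · rw [if_neg hmem, if_neg hmem]
    · rw [if_neg hpos, if_neg hpos]
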